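-- pv_equiv track=rewrite | github.com/hunglc007/tensorflow-yolov4-tflite | scripts/draw_training_boxes.py | read_from_annotation
-- ===== SOURCE A (Python) =====
-- def swap_dimension(coord):
--     """
--     swap x, y, x, y to y, x, y, x
--     """
--     for dimension in coord:
--         dimension[0], dimension[1], dimension[2], dimension[3] = dimension[1], dimension[0], dimension[3], dimension[2]
--     return coord
--
-- def read_from_annotation(annotation_string):
--     splits = annotation_string.split(' ')
--     image_path = splits[0]
--     boxes = splits[1:]
--     coord = []
--
--     for box in boxes:
--         # skip empty string
--         if len(box) == 0:
--             continue
--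
--         # coord.append([int(x) for x in box.split(",")[:-1]]) # last one is classification
--         coord.append([int(x) for x in box.split(",")])
--
--     return image_path, swap_dimension(coord)
-- ===== SOURCE B (Python) =====
-- def read_from_annotation(annotation_string):
--     # Single left-to-right character scan with an explicit parser state
--     # (path / current field / current row); no str.split and no second pass.
--     path = None
--     token = ''
--     row = []
--     coord = []
--     for ch in annotation_string + ' ':
--         if path is None:
--             if ch == ' ':
--                 path = token
--                 token = ''
--             else:
--                 token += ch
--         elif ch == ',':
--             row.append(int(token))
--             token = ''
--         elif ch == ' ':
--             if token or row:
--                 row.append(int(token))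
--                 y, x, h, w, *rest = row
--                 coord.append([x, y, w, h] + rest)
--                 row = []
--             token = ''
--         else:
--             token += ch
--     return path, coord
-- ===== Notes on version B (the rewrite author's own statement) =====
-- stated objective: alternative
-- what changed: B replaces A's split-into-tokens-then-parse-then-second-swap-pass pipeline by a single character-level scan: one finite-state pass over the string (path / current field / current row accumulators) that never calls str.split and emits each box, already swapped via star-unpacking, the moment its terminating space is seen.
import Mathlib
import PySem

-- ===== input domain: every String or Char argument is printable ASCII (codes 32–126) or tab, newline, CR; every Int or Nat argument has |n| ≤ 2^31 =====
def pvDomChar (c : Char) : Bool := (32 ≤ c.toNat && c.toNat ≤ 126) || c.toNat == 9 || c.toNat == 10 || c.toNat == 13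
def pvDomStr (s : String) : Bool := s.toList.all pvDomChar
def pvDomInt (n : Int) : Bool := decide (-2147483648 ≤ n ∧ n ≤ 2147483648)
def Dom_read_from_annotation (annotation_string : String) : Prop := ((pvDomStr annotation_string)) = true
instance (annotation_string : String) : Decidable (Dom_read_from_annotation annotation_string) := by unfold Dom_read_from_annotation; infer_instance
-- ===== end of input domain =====

-- B replaces A's split/parse/second-swap-pass pipeline by ONE character-level scan that
-- never calls str.split and emits each box already swapped (objective: alternative).

-- ===== PORT A =====
-- [int(x) for x in box.split(",")]  (none = ValueError, excluded by Pre_)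
def pvIntList? (box : List Char) : Option (List Int) :=
  (PySem.Chars.splitOn box [',']).mapM PySem.Int.ofChars?

-- one iteration of swap_dimension's in-place tuple assignment:
-- reads r[1], r[0], r[3], r[2] (IndexError on a short row → none), then writes slots 0..3
def pvSwapRow? (r : List Int) : Option (List Int) :=
  match PySem.List.pyGet? r 1, PySem.List.pyGet? r 0, PySem.List.pyGet? r 3, PySem.List.pyGet? r 2 with
  | some a, some b, some c, some d => some (a :: b :: c :: d :: r.drop 4)
  | _, _, _, _ => none

-- swap_dimension: the for-loop over coord
def pvSwapDim? : List (List Int) → Option (List (List Int))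
  | [] => some []
  | r :: rest => do
      let r' ← pvSwapRow? r
      let rest' ← pvSwapDim? rest
      return r' :: rest'

-- A's first loop: build coord, skipping empty strings
def pvAParse? : List (List Char) → Option (List (List Int))
  | [] => some []
  | b :: rest =>
      if b.isEmpty then pvAParse? rest
      else do
        let p ← pvIntList? b
        let rest' ← pvAParse? rest
        return p :: rest'

def read_from_annotation (annotation_string : String) : String × List (List Int) :=
  let splits := PySem.Chars.splitOn annotation_string.toList [' ']
  let image_path := String.ofList (splits.headD [])   -- str.split(' ') never returns an empty list
  -- parse pass, then the swap pass over its result; none only outside Pre_ (Python A raises there)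
  ((image_path), ((pvAParse? (splits.drop 1)).bind pvSwapDim?).getD [])

-- ===== PORT B =====
-- 'y, x, h, w, *rest = row' followed by '[x, y, w, h] + rest' (none = ValueError on a short row)
def pvSwapUnpack? : List Int → Option (List Int)
  | y :: x :: h :: w :: rest => some (x :: y :: w :: h :: rest)
  | _ => none

-- B's single character scan over annotation_string + ' ':
-- state = (path : Option, token : current field chars, row : ints of current box, coord)
def pvBScan : List Char → Option (List Char) → List Char → List Int → List (List Int) →
    Option (List Char × List (List Int))
  | [], path, _token, _row, coord => some (path.getD [], coord)
  | c :: cs, none, token, row, coord =>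
      if c = ' ' then pvBScan cs (some token) [] row coord
      else pvBScan cs none (token ++ [c]) row coord
  | c :: cs, some p, token, row, coord =>
      if c = ',' then
        match PySem.Int.ofChars? token with     -- row.append(int(token))
        | none => none
        | some v => pvBScan cs (some p) [] (row ++ [v]) coord
      else if c = ' ' then
        if token = [] ∧ row = [] then pvBScan cs (some p) [] [] coord
        else
          match PySem.Int.ofChars? token with
          | none => none
          | some v =>
            match pvSwapUnpack? (row ++ [v]) with
            | none => none
            | some r => pvBScan cs (some p) [] [] (coord ++ [r])
      else pvBScan cs (some p) (token ++ [c]) row coord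

def read_from_annotation_alt (annotation_string : String) : String × List (List Int) :=
  match pvBScan (annotation_string.toList ++ [' ']) none [] [] [] with
  | some (p, cd) => (String.ofList p, cd)
  | none => ("", [])   -- none only outside Pre_ (Python B raises there)

-- ===== PRECONDITION & SPEC =====
-- Pre_ excludes exactly the inputs on which Python A raises: a nonempty box token whose
-- comma-split has a field int() rejects (ValueError) or fewer than 4 fields (IndexError in the swap).
def Pre_read_from_annotation (annotation_string : String) : Prop :=
  (((PySem.Chars.splitOn annotation_string.toList [' ']).drop 1).all (fun t =>
      t.isEmpty ||
        (decide (4 ≤ (PySem.Chars.splitOn t [',']).length) &&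
          (PySem.Chars.splitOn t [',']).all (fun x => (PySem.Int.ofChars? x).isSome)))) = true
instance (annotation_string : String) : Decidable (Pre_read_from_annotation annotation_string) := by
  unfold Pre_read_from_annotation; infer_instance

def pvWitness_read_from_annotation : String := "img.jpg 10,20,30,40,1 5,6,7,8,0"

def Spec_read_from_annotation (annotation_string : String) (out : String × List (List Int)) : Prop := out = read_from_annotation_alt annotation_string
instance (annotation_string : String) (out : String × List (List Int)) : Decidable (Spec_read_from_annotation annotation_string out) := by unfold Spec_read_from_annotation; infer_instance

-- ===== CLAIM (what is proved, stated in full; the proofs are below) =====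
def Claim_equal_read_from_annotation : Prop := ∀ (annotation_string : String), Dom_read_from_annotation annotation_string → Pre_read_from_annotation annotation_string → Spec_read_from_annotation annotation_string (read_from_annotation annotation_string)

-- ===== LEMMAS AND PROOFS =====

-- simple right-recursive single-character split (proof-side model of str.split(sep))
def pvSp (sep : Char) : List Char → List (List Char)
  | [] => [[]]
  | c :: cs => if c = sep then [] :: pvSp sep cs else (pvSp sep cs).modifyHead (c :: ·)

theorem pvSp_ne_nil (sep : Char) (cs : List Char) : pvSp sep cs ≠ [] := by
  cases cs with
  | nil => simp [pvSp]
  | cons c cs =>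
    simp only [pvSp]
    split
    · simp
    · cases h : pvSp sep cs with
      | nil => exact absurd h (pvSp_ne_nil sep cs)
      | cons t ts => simp [List.modifyHead]

theorem pvSp_go (sep : Char) (fuel : Nat) :
    ∀ (l cur : List Char) (acc : List (List Char)), l.length < fuel →
      PySem.Chars.splitOn.go [sep] fuel l cur acc =
        acc.reverse ++ (pvSp sep l).modifyHead (cur.reverse ++ ·) := by
  induction fuel with
  | zero => intro l cur acc h; omega
  | succ f ih =>
    intro l cur acc h
    cases l with
    | nil => simp [PySem.Chars.splitOn.go, pvSp, List.modifyHead]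
    | cons c rest =>
      simp only [PySem.Chars.splitOn.go, List.isPrefixOf, List.length_cons] at *
      by_cases hc : c = sep
      · simp only [hc, BEq.rfl, Bool.true_and, List.isPrefixOf, if_pos,
          List.length_cons, List.length_nil, List.drop_succ_cons, List.drop_zero]
        rw [ih _ _ _ (by omega)]
        simp only [pvSp, if_pos rfl, List.modifyHead, List.reverse_cons, List.append_assoc,
          List.nil_append, List.singleton_append, List.cons_append]
        cases pvSp sep rest <;> simp [List.modifyHead]
      · have hbeq : (sep == c) = false := by simp; exact fun h' => hc h'.symm
        simp only [hbeq, Bool.false_and, Bool.false_eq_true, if_false]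
        rw [ih _ _ _ (by omega)]
        simp only [pvSp, if_neg hc]
        cases hsp : pvSp sep rest with
        | nil => exact absurd hsp (pvSp_ne_nil sep rest)
        | cons t ts => simp [List.modifyHead]

theorem pvSplitOn_eq_pvSp (sep : Char) (cs : List Char) :
    PySem.Chars.splitOn cs [sep] = pvSp sep cs := by
  show PySem.Chars.splitOn.go [sep] (cs.length + 1) cs [] [] = _
  rw [pvSp_go sep (cs.length + 1) cs [] [] (by omega)]
  cases h : pvSp sep cs with
  | nil => exact absurd h (pvSp_ne_nil sep cs)
  | cons t ts => simp [List.modifyHead]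

theorem pvSp_append_no_sep (sep : Char) (as bs : List Char) (h : sep ∉ as) :
    pvSp sep (as ++ bs) = (pvSp sep bs).modifyHead (as ++ ·) := by
  induction as with
  | nil =>
    cases hb : pvSp sep bs with
    | nil => exact absurd hb (pvSp_ne_nil sep bs)
    | cons t ts => simp [hb, List.modifyHead]
  | cons a as ihs =>
    simp only [List.mem_cons, not_or] at h
    simp only [List.cons_append, pvSp, if_neg (fun hq : a = sep => h.1 hq.symm), ihs h.2]
    cases hb : pvSp sep bs with
    | nil => exact absurd hb (pvSp_ne_nil sep bs)
    | cons t ts => simp [hb, List.modifyHead]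

theorem pvSp_no_sep (sep : Char) (as : List Char) (h : sep ∉ as) : pvSp sep as = [as] := by
  have := pvSp_append_no_sep sep as [] h
  simpa [pvSp, List.modifyHead] using this

-- proof-side model of B's box phase over whole tokens
def pvTokens? : List (List Char) → List (List Int) → Option (List (List Int))
  | [], coord => some coord
  | t :: ts, coord =>
    if t = [] then pvTokens? ts coord
    else
      match (pvSp ',' t).mapM PySem.Int.ofChars? with
      | none => none
      | some fs =>
        match pvSwapUnpack? fs with
        | none => none
        | some r => pvTokens? ts (coord ++ [r])

-- like pvTokens? but the first token continues a partially read box (token, row)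
def pvFirst? (token : List Char) (row : List Int) :
    List (List Char) → List (List Int) → Option (List (List Int))
  | [], _coord => none
  | t :: ts, coord =>
    (if token = [] ∧ row = [] ∧ t = [] then some coord
     else
       match (pvSp ',' (token ++ t)).mapM PySem.Int.ofChars? with
       | none => none
       | some fs =>
         match pvSwapUnpack? (row ++ fs) with
         | none => none
         | some r => some (coord ++ [r])).bind (fun cd => pvTokens? ts cd)

theorem pvFirst?_fresh (t : List Char) (ts : List (List Char)) (coord : List (List Int)) :
    pvFirst? [] [] (t :: ts) coord = pvTokens? (t :: ts) coord := by
  by_cases ht : t = []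
  · simp [pvFirst?, pvTokens?, ht, Option.bind]
  · simp only [pvFirst?, pvTokens?, if_neg ht, List.nil_append, true_and, if_neg ht]
    cases hfs : (pvSp ',' t).mapM PySem.Int.ofChars? with
    | none => simp [hfs]
    | some fs =>
      cases hs : pvSwapUnpack? fs with
      | none => simp [hfs, hs]
      | some r => simp [hfs, hs]

theorem pvScan_box (p : List Char) (cs : List Char) :
    ∀ (token : List Char) (row : List Int) (coord : List (List Int)), ',' ∉ token →
      pvBScan (cs ++ [' ']) (some p) token row coord =
        (pvFirst? token row (pvSp ' ' cs) coord).map (fun cd => (p, cd)) := by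
  induction cs with
  | nil =>
    intro token row coord htok
    simp only [pvSp, List.nil_append]
    show pvBScan [' '] (some p) token row coord = _
    simp only [pvBScan, reduceIte]
    by_cases hskip : token = [] ∧ row = []
    · simp [pvFirst?, hskip.1, hskip.2, pvBScan, pvTokens?]
    · rw [if_neg hskip]
      simp only [pvFirst?, List.append_nil, pvSp_no_sep ',' token htok,
        List.mapM_cons, List.mapM_nil, and_true]
      rw [if_neg hskip]
      cases hv : PySem.Int.ofChars? token with
      | none => simp [hv]
      | some v =>
        simp only [hv, Option.bind_some, Option.pure_def, Option.map_some]
        cases hs : pvSwapUnpack? (row ++ [v]) with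
        | none => simp [hs]
        | some r => simp [hs, pvBScan, pvTokens?]
  | cons c cs' ih =>
    intro token row coord htok
    obtain ⟨t', rest, hsp⟩ : ∃ t' rest, pvSp ' ' cs' = t' :: rest := by
      cases h : pvSp ' ' cs' with
      | nil => exact absurd h (pvSp_ne_nil ' ' cs')
      | cons a b => exact ⟨a, b, rfl⟩
    by_cases hc : c = ','
    · subst hc
      show pvBScan (',' :: (cs' ++ [' '])) (some p) token row coord = _
      simp only [pvBScan, reduceIte]
      have hhead : pvSp ' ' (',' :: cs') = (',' :: t') :: rest := by
        simp [pvSp, hsp, List.modifyHead]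
      rw [hhead]
      have hfields : pvSp ',' (token ++ ',' :: t') = token :: pvSp ',' t' := by
        rw [pvSp_append_no_sep ',' token (',' :: t') htok]
        simp [pvSp, List.modifyHead]
      have hcond : ¬ (token = [] ∧ row = [] ∧ (',' :: t') = []) := by simp
      simp only [pvFirst?, if_neg hcond, hfields, List.mapM_cons]
      cases hv : PySem.Int.ofChars? token with
      | none => simp [hv]
      | some v =>
        simp only [ih [] (row ++ [v]) coord (by simp), hsp]
        have hcond2 : ¬ (([] : List Char) = [] ∧ row ++ [v] = [] ∧ t' = []) := by simp
        simp only [pvFirst?, if_neg hcond2, List.nil_append, Option.bind_some,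
          Option.pure_def]
        cases hfs : (pvSp ',' t').mapM PySem.Int.ofChars? with
        | none => simp [hfs]
        | some fs => simp [hfs, List.append_assoc]
    · by_cases hspc : c = ' '
      · subst hspc
        show pvBScan (' ' :: (cs' ++ [' '])) (some p) token row coord = _
        simp only [pvBScan, reduceIte]
        have hhead : pvSp ' ' (' ' :: cs') = [] :: t' :: rest := by
          simp [pvSp, hsp]
        rw [hhead]
        have hfresh : ∀ coord', pvBScan (cs' ++ [' ']) (some p) [] [] coord' =
            (pvTokens? (t' :: rest) coord').map (fun cd => (p, cd)) := by
          intro coord'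
          rw [ih [] [] coord' (by simp), hsp, pvFirst?_fresh]
        by_cases hskip : token = [] ∧ row = []
        · rw [if_pos hskip, hfresh]
          simp [pvFirst?, hskip.1, hskip.2]
        · rw [if_neg hskip]
          simp only [pvFirst?, List.append_nil, pvSp_no_sep ',' token htok,
            List.mapM_cons, List.mapM_nil, and_true]
          rw [if_neg hskip]
          cases hv : PySem.Int.ofChars? token with
          | none => simp [hv]
          | some v =>
            simp only [hv, Option.bind_some, Option.pure_def, Option.map_some]
            cases hs : pvSwapUnpack? (row ++ [v]) with
            | none => simp [hs]
            | some r => simp only [hfresh (coord ++ [r])]; simp [hs]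
      · show pvBScan (c :: (cs' ++ [' '])) (some p) token row coord = _
        simp only [pvBScan, if_neg hc, if_neg hspc]
        have hhead : pvSp ' ' (c :: cs') = (c :: t') :: rest := by
          simp [pvSp, if_neg hspc, hsp, List.modifyHead]
        rw [hhead, ih (token ++ [c]) row coord
          (by simp [htok]; exact fun h => hc h.symm), hsp]
        have h1 : ¬ (token = [] ∧ row = [] ∧ (c :: t') = []) := by simp
        have h2 : ¬ (token ++ [c] = [] ∧ row = [] ∧ t' = []) := by simp
        simp only [pvFirst?, if_neg h1, if_neg h2, List.append_assoc, List.cons_append,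
          List.nil_append]

theorem pvScan_path (cs : List Char) :
    ∀ (token : List Char) (coord : List (List Int)),
      pvBScan (cs ++ [' ']) none token [] coord =
        (pvTokens? (pvSp ' ' cs).tail coord).map
          (fun cd => (token ++ (pvSp ' ' cs).headI, cd)) := by
  induction cs with
  | nil =>
    intro token coord
    show pvBScan [' '] none token [] coord = _
    simp [pvBScan, pvSp, pvTokens?]
  | cons c cs' ih =>
    intro token coord
    obtain ⟨t', rest, hsp⟩ : ∃ t' rest, pvSp ' ' cs' = t' :: rest := by
      cases h : pvSp ' ' cs' with
      | nil => exact absurd h (pvSp_ne_nil ' ' cs')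
      | cons a b => exact ⟨a, b, rfl⟩
    by_cases hc : c = ' '
    · subst hc
      show pvBScan (' ' :: (cs' ++ [' '])) none token [] coord = _
      simp only [pvBScan, reduceIte]
      rw [pvScan_box token cs' [] [] coord (by simp), hsp, pvFirst?_fresh]
      have hhead : pvSp ' ' (' ' :: cs') = [] :: t' :: rest := by simp [pvSp, hsp]
      rw [hhead]
      simp [hsp]
    · show pvBScan (c :: (cs' ++ [' '])) none token [] coord = _
      simp only [pvBScan, if_neg hc]
      rw [ih (token ++ [c]) coord]
      have hhead : pvSp ' ' (c :: cs') = (c :: t') :: rest := by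
        simp [pvSp, if_neg hc, hsp, List.modifyHead]
      rw [hsp, hhead]
      simp [List.append_assoc]

-- A's swap of one row equals B's star-unpacking swap
theorem pvSwapRow?_eq (r : List Int) : pvSwapRow? r = pvSwapUnpack? r := by
  match r with
  | [] => rfl
  | [a] => rfl
  | [a, b] => rfl
  | [a, b, c] => rfl
  | a :: b :: c :: d :: rest =>
    simp only [pvSwapRow?, pvSwapUnpack?, PySem.List.pyGet?, PySem.List.pyIdx?,
      PySem.List.len, List.length_cons]
    split_ifs <;> first | omega | rfl | norm_num

-- A's two-pass pipeline over the tokens equals B's one-pass accumulator loop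
theorem pvPipe_eq (ts : List (List Char)) :
    ∀ (coord : List (List Int)),
      pvTokens? ts coord = ((pvAParse? ts).bind pvSwapDim?).map (coord ++ ·) := by
  induction ts with
  | nil => intro coord; simp [pvTokens?, pvAParse?, pvSwapDim?]
  | cons t ts' ih =>
    intro coord
    by_cases ht : t = []
    · simp [pvTokens?, pvAParse?, ht, ih]
    · have hne : ¬ t.isEmpty := by simp [List.isEmpty_iff, ht]
      have hint : pvIntList? t = (pvSp ',' t).mapM PySem.Int.ofChars? := by
        simp [pvIntList?, pvSplitOn_eq_pvSp]
      simp only [pvTokens?, pvAParse?, if_neg ht, hne, Bool.false_eq_true, if_false, hint]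
      cases hfs : (pvSp ',' t).mapM PySem.Int.ofChars? with
      | none => simp
      | some fs =>
        cases hs : pvSwapUnpack? fs with
        | none =>
          cases hr : pvAParse? ts' with
          | none => simp [hr, hs]
          | some rs => simp [hr, pvSwapDim?, pvSwapRow?_eq, hs]
        | some r =>
          simp only [hs, ih (coord ++ [r])]
          cases hr : pvAParse? ts' with
          | none => simp [hr, hs]
          | some rs =>
            simp only [hr, Option.bind_some, Option.pure_def, Option.map_some, pvSwapDim?,
              pvSwapRow?_eq, hs]
            cases hsw : pvSwapDim? rs with
            | none => simp [pvSwapDim?, pvSwapRow?_eq, hs, hsw]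
            | some out => simp [pvSwapDim?, pvSwapRow?_eq, hs, hsw, List.append_assoc]

-- a mapM over options succeeds, with the same length, when every element succeeds
theorem pvMapM_isSome {α β : Type} (f : α → Option β) (xs : List α)
    (h : ∀ x ∈ xs, (f x).isSome) :
    ∃ ys, xs.mapM f = some ys ∧ ys.length = xs.length := by
  induction xs with
  | nil => exact ⟨[], by simp, rfl⟩
  | cons x xs ih =>
    obtain ⟨v, hv⟩ := Option.isSome_iff_exists.mp (h x (by simp))
    obtain ⟨ys, hys, hlen⟩ := ih (fun y hy => h y (by simp [hy]))
    exact ⟨v :: ys, by simp [List.mapM_cons, hv, hys], by simp [hlen]⟩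

-- under Pre_'s per-token condition the one-pass loop never fails
theorem pvTokens?_isSome (ts : List (List Char))
    (h : ∀ t ∈ ts, t = [] ∨ (4 ≤ (pvSp ',' t).length ∧
        ∀ x ∈ pvSp ',' t, (PySem.Int.ofChars? x).isSome)) :
    ∀ coord, (pvTokens? ts coord).isSome := by
  induction ts with
  | nil => intro coord; simp [pvTokens?]
  | cons t ts' ih =>
    intro coord
    have ht := h t (by simp)
    have hts : ∀ t' ∈ ts', t' = [] ∨ (4 ≤ (pvSp ',' t').length ∧
        ∀ x ∈ pvSp ',' t', (PySem.Int.ofChars? x).isSome) :=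
      fun t' ht' => h t' (by simp [ht'])
    rcases ht with ht | ⟨hlen, hall⟩
    · simp only [pvTokens?, if_pos ht]; exact ih hts coord
    · by_cases ht0 : t = []
      · simp only [pvTokens?, if_pos ht0]; exact ih hts coord
      · simp only [pvTokens?, if_neg ht0]
        obtain ⟨fs, hfs, hlenfs⟩ := pvMapM_isSome PySem.Int.ofChars? (pvSp ',' t) hall
        rw [hfs]
        obtain ⟨a, b, cc, d, rest, hshape⟩ : ∃ a b cc d rest, fs = a :: b :: cc :: d :: rest := by
          match fs, (by omega : 4 ≤ fs.length) with
          | a :: b :: cc :: d :: rest, _ => exact ⟨a, b, cc, d, rest, rfl⟩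
        rw [hshape]
        simp only [pvSwapUnpack?]
        exact ih hts (coord ++ [b :: a :: d :: cc :: rest])

-- ===== VERDICT (by name: the statement is the Claim_ definition above) =====
theorem read_from_annotation_spec : Claim_equal_read_from_annotation := by
  intro s _ hPre
  unfold Pre_read_from_annotation at hPre
  rw [pvSplitOn_eq_pvSp] at hPre
  obtain ⟨t, ts, hsp⟩ : ∃ t ts, pvSp ' ' s.toList = t :: ts := by
    cases h : pvSp ' ' s.toList with
    | nil => exact absurd h (pvSp_ne_nil ' ' s.toList)
    | cons a b => exact ⟨a, b, rfl⟩
  have hcond : ∀ t' ∈ ts, t' = [] ∨ (4 ≤ (pvSp ',' t').length ∧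
      ∀ x ∈ pvSp ',' t', (PySem.Int.ofChars? x).isSome) := by
    intro t' ht'
    rw [hsp] at hPre
    simp only [List.drop_one, List.tail_cons, List.all_eq_true] at hPre
    have := hPre t' ht'
    rw [pvSplitOn_eq_pvSp] at this
    simp only [Bool.or_eq_true, Bool.and_eq_true, decide_eq_true_eq, List.all_eq_true,
      List.isEmpty_iff] at this
    rcases this with h | ⟨h1, h2⟩
    · exact Or.inl h
    · exact Or.inr ⟨h1, fun x hx => h2 x hx⟩
  obtain ⟨cd, hcd⟩ := Option.isSome_iff_exists.mp (pvTokens?_isSome ts hcond [])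
  show read_from_annotation s = read_from_annotation_alt s
  unfold read_from_annotation read_from_annotation_alt
  rw [pvScan_path s.toList [] []]
  rw [pvSplitOn_eq_pvSp, hsp]
  have hpipe := pvPipe_eq ts ([] : List (List Int))
  rw [hcd] at hpipe
  have hAP : (pvAParse? ts).bind pvSwapDim? = some cd := by
    cases hx : (pvAParse? ts).bind pvSwapDim? with
    | none => rw [hx] at hpipe; simp at hpipe
    | some y => rw [hx] at hpipe; simp at hpipe; rw [hpipe]
  simp [hcd, hAP]
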